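-- pv_equiv track=rewrite | github.com/jaywyawhare/PuchAI-Hiring-Challenge | src/services/researchers_wet_dream_service.py | _analyze_practical_implications
-- ===== SOURCE A (Python) =====
-- from typing import Dict, Any, Optional, List, Set
--
-- def _analyze_practical_implications(citations: List[Dict[str, Any]], session_data: Dict[str, Any]) -> List[str]:
--     """Analyze practical implications of the research."""
--     implications = []
--
--     # Check for policy implications
--     policy_terms = ['policy', 'regulation', 'law', 'government', 'public', 'society']
--     has_policy_implications = any(
--         any(term in c.get('title', '').lower() or term in c.get('abstract', '').lower()
--             for term in policy_terms)
--         for c in citations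
--     )
--
--     if has_policy_implications:
--         implications.append("Research has significant policy implications requiring government attention")
--
--     # Check for industry applications
--     industry_terms = ['industry', 'business', 'commercial', 'market', 'economic', 'financial']
--     has_industry_implications = any(
--         any(term in c.get('title', '').lower() or term in c.get('abstract', '').lower()
--             for term in industry_terms)
--         for c in citations
--     )
--
--     if has_industry_implications:
--         implications.append("Research has commercial applications with economic implications")
--
--     # Check for ethical implications
--     ethical_terms = ['ethical', 'moral', 'rights', 'privacy', 'security', 'safety', 'risk']
--     has_ethical_implications = any(
--         any(term in c.get('title', '').lower() or term in c.get('abstract', '').lower()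
--             for term in ethical_terms)
--         for c in citations
--     )
--
--     if has_ethical_implications:
--         implications.append("Research raises ethical concerns requiring careful consideration")
--
--     # Check for technological implications
--     tech_terms = ['technology', 'innovation', 'development', 'advancement', 'breakthrough']
--     has_tech_implications = any(
--         any(term in c.get('title', '').lower() or term in c.get('abstract', '').lower()
--             for term in tech_terms)
--         for c in citations
--     )
--
--     if has_tech_implications:
--         implications.append("Research has technological implications for future development")
--
--     return implications
-- ===== SOURCE B (Python) =====
-- from typing import Dict, Any, List
--
-- _POLICY = ['policy', 'regulation', 'law', 'government', 'public', 'society']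
-- _INDUSTRY = ['industry', 'business', 'commercial', 'market', 'economic', 'financial']
-- _ETHICAL = ['ethical', 'moral', 'rights', 'privacy', 'security', 'safety', 'risk']
-- _TECH = ['technology', 'innovation', 'development', 'advancement', 'breakthrough']
--
-- def _analyze_practical_implications(citations: List[Dict[str, Any]], session_data: Dict[str, Any]) -> List[str]:
--     """Single pass over citations maintaining four boolean flags."""
--     has_policy = has_industry = has_ethical = has_tech = False
--     for c in citations:
--         title = c.get('title', '').lower()
--         abstract = c.get('abstract', '').lower()
--         has_policy = has_policy or any(t in title or t in abstract for t in _POLICY)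
--         has_industry = has_industry or any(t in title or t in abstract for t in _INDUSTRY)
--         has_ethical = has_ethical or any(t in title or t in abstract for t in _ETHICAL)
--         has_tech = has_tech or any(t in title or t in abstract for t in _TECH)
--     implications = []
--     if has_policy:
--         implications.append("Research has significant policy implications requiring government attention")
--     if has_industry:
--         implications.append("Research has commercial applications with economic implications")
--     if has_ethical:
--         implications.append("Research raises ethical concerns requiring careful consideration")
--     if has_tech:
--         implications.append("Research has technological implications for future development")
--     return implications
-- ===== Notes on version B (the rewrite author's own statement) =====
-- stated objective: simpler
-- what changed: Replaces four separate any-scans over the citation list with one pass that lowercases each title/abstract once and maintains four boolean flags, appending the messages afterwards.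
import Mathlib
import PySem

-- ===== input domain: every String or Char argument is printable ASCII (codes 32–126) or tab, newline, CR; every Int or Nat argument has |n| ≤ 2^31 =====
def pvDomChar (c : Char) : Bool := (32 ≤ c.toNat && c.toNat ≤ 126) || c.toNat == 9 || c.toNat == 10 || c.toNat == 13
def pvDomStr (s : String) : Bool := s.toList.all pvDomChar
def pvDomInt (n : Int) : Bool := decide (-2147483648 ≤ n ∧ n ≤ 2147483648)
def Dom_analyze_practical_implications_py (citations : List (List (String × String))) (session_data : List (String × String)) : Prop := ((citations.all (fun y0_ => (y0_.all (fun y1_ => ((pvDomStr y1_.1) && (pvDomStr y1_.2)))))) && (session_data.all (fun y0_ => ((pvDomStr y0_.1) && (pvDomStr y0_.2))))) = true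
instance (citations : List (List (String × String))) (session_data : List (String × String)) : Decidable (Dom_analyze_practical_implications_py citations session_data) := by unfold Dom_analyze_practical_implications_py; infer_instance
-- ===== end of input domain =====

-- B does one pass over citations with four boolean accumulators instead of A's four separate any-scans; return value is identical.

-- shared term-list / message constants (module-level data in both programs)
def pvPolicyTerms : List String := ["policy", "regulation", "law", "government", "public", "society"]
def pvIndustryTerms : List String := ["industry", "business", "commercial", "market", "economic", "financial"]
def pvEthicalTerms : List String := ["ethical", "moral", "rights", "privacy", "security", "safety", "risk"]
def pvTechTerms : List String := ["technology", "innovation", "development", "advancement", "breakthrough"]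
def pvMsgPolicy : String := "Research has significant policy implications requiring government attention"
def pvMsgIndustry : String := "Research has commercial applications with economic implications"
def pvMsgEthical : String := "Research raises ethical concerns requiring careful consideration"
def pvMsgTech : String := "Research has technological implications for future development"

-- ===== PORT A =====
-- A's per-citation test: any(term in c.get('title','').lower() or term in c.get('abstract','').lower() for term in terms)
def pvHitA (terms : List String) (c : List (String × String)) : Bool :=
  terms.any (fun t =>
    PySem.Str.isIn t (PySem.Str.lower ((PySem.Dict.mk c).getD "title" "")) ||
    PySem.Str.isIn t (PySem.Str.lower ((PySem.Dict.mk c).getD "abstract" "")))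

def analyze_practical_implications_py (citations : List (List (String × String))) (session_data : List (String × String)) : List String :=
  let implications : List String := []
  let has_policy_implications := citations.any (fun c => pvHitA pvPolicyTerms c)
  let implications := if has_policy_implications then implications ++ [pvMsgPolicy] else implications
  let has_industry_implications := citations.any (fun c => pvHitA pvIndustryTerms c)
  let implications := if has_industry_implications then implications ++ [pvMsgIndustry] else implications
  let has_ethical_implications := citations.any (fun c => pvHitA pvEthicalTerms c)
  let implications := if has_ethical_implications then implications ++ [pvMsgEthical] else implications
  let has_tech_implications := citations.any (fun c => pvHitA pvTechTerms c)
  let implications := if has_tech_implications then implications ++ [pvMsgTech] else implications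
  implications

-- ===== PORT B =====
-- B's per-citation test on the already-lowercased title/abstract
def pvCiteHit (terms : List String) (title abstract : String) : Bool :=
  terms.any (fun t => PySem.Str.isIn t title || PySem.Str.isIn t abstract)

-- loop body of B's single pass: update the four flags from one citation
def pvStep (f : Bool × Bool × Bool × Bool) (c : List (String × String)) : Bool × Bool × Bool × Bool :=
  let title := PySem.Str.lower ((PySem.Dict.mk c).getD "title" "")
  let abstract := PySem.Str.lower ((PySem.Dict.mk c).getD "abstract" "")
  (f.1 || pvCiteHit pvPolicyTerms title abstract,
   f.2.1 || pvCiteHit pvIndustryTerms title abstract,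
   f.2.2.1 || pvCiteHit pvEthicalTerms title abstract,
   f.2.2.2 || pvCiteHit pvTechTerms title abstract)

def analyze_practical_implications_py_alt (citations : List (List (String × String))) (session_data : List (String × String)) : List String :=
  let flags := citations.foldl pvStep (false, false, false, false)
  (if flags.1 then [pvMsgPolicy] else []) ++
  (if flags.2.1 then [pvMsgIndustry] else []) ++
  (if flags.2.2.1 then [pvMsgEthical] else []) ++
  (if flags.2.2.2 then [pvMsgTech] else [])

-- ===== PRECONDITION & SPEC =====
def Spec_analyze_practical_implications_py (citations : List (List (String × String))) (session_data : List (String × String)) (out : List String) : Prop := out = analyze_practical_implications_py_alt citations session_data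
instance (citations : List (List (String × String))) (session_data : List (String × String)) (out : List String) : Decidable (Spec_analyze_practical_implications_py citations session_data out) := by unfold Spec_analyze_practical_implications_py; infer_instance

-- ===== CLAIM (what is proved, stated in full; the proofs are below) =====
def Claim_equal_analyze_practical_implications_py : Prop := ∀ (citations : List (List (String × String))) (session_data : List (String × String)), Dom_analyze_practical_implications_py citations session_data → Spec_analyze_practical_implications_py citations session_data (analyze_practical_implications_py citations session_data)

-- ===== LEMMAS AND PROOFS =====

-- B's fold of the four flags computes A's four any-scans
lemma pv_foldl_flags (cs : List (List (String × String))) (a b c d : Bool) :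
    cs.foldl pvStep (a, b, c, d) =
      (a || cs.any (fun x => pvHitA pvPolicyTerms x),
       b || cs.any (fun x => pvHitA pvIndustryTerms x),
       c || cs.any (fun x => pvHitA pvEthicalTerms x),
       d || cs.any (fun x => pvHitA pvTechTerms x)) := by
  induction cs generalizing a b c d with
  | nil => simp
  | cons x xs ih =>
    simp only [List.foldl_cons, List.any_cons, pvStep, ih]
    simp [pvCiteHit, pvHitA, Bool.or_assoc]

-- ===== VERDICT (by name: the statement is the Claim_ definition above) =====
theorem analyze_practical_implications_py_spec : Claim_equal_analyze_practical_implications_py := by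
  intro citations session_data _
  unfold Spec_analyze_practical_implications_py
  unfold analyze_practical_implications_py analyze_practical_implications_py_alt
  rw [pv_foldl_flags]
  simp only [Bool.false_or]
  cases citations.any (fun c => pvHitA pvPolicyTerms c) <;>
    cases citations.any (fun c => pvHitA pvIndustryTerms c) <;>
      cases citations.any (fun c => pvHitA pvEthicalTerms c) <;>
        cases citations.any (fun c => pvHitA pvTechTerms c) <;> simp
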